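-- pv_equiv track=rewrite | github.com/Mosalah992/SAN | backend/curiosity_dialogue.py | _detect_ollama_loop
-- ===== SOURCE A (Python) =====
-- _OLLAMA_LOOP_PATTERNS = (
--     "i'm just a program",
--     "i don't have beliefs",
--     "as a machine",
--     "i can't change my position",
--     "i don't have a mind",
--     "i'm not conscious",
--     "* silence",
-- )
--
-- def _detect_ollama_loop(turns: list[dict], window: int = 5, threshold: int = 2) -> bool:
--     """True if recent Ollama messages repeat same stuck pattern (e.g. 'I don't have beliefs')."""
--     ollama_recent = [
--         t["content"].strip().lower()[:80]
--         for t in turns[-window:]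
--         if t.get("author") == "Ollama"
--     ]
--     if len(ollama_recent) < threshold:
--         return False
--     for pattern in _OLLAMA_LOOP_PATTERNS:
--         if sum(1 for m in ollama_recent if pattern in m) >= threshold:
--             return True
--     # Same message repeated
--     if len(ollama_recent) >= threshold:
--         for i, m in enumerate(ollama_recent):
--             if sum(1 for x in ollama_recent if x[:60] == m[:60]) >= threshold:
--                 return True
--     return False
-- ===== SOURCE B (Python) =====
-- _OLLAMA_LOOP_PATTERNS = (
--     "i'm just a program",
--     "i don't have beliefs",
--     "as a machine",
--     "i can't change my position",
--     "i don't have a mind",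
--     "i'm not conscious",
--     "* silence",
-- )
--
-- def _detect_ollama_loop(turns: list[dict], window: int = 5, threshold: int = 2) -> bool:
--     """Frequency-table version: build pattern-hit and 60-char-prefix counters once,
--     then check whether any count reaches the threshold."""
--     ollama_recent = [
--         t["content"].strip().lower()[:80]
--         for t in turns[-window:]
--         if t.get("author") == "Ollama"
--     ]
--     if len(ollama_recent) < threshold:
--         return False
--     pat_counts = {p: 0 for p in _OLLAMA_LOOP_PATTERNS}
--     for m in ollama_recent:
--         for p in _OLLAMA_LOOP_PATTERNS:
--             if p in m:
--                 pat_counts[p] += 1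
--     prefix_counts = {}
--     for m in ollama_recent:
--         k = m[:60]
--         prefix_counts[k] = prefix_counts.get(k, 0) + 1
--     return any(c >= threshold for c in pat_counts.values()) or any(
--         c >= threshold for c in prefix_counts.values()
--     )
-- ===== Notes on version B (the rewrite author's own statement) =====
-- stated objective: alternative
-- what changed: The nested rescan (per-pattern generator sums and an O(n^2) enumerate-with-inner-count duplicate scan) is replaced by building two frequency tables in plain passes over the messages (pattern-hit counts and a 60-char-prefix counter) followed by a single any-over-values check.
import Mathlib
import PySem

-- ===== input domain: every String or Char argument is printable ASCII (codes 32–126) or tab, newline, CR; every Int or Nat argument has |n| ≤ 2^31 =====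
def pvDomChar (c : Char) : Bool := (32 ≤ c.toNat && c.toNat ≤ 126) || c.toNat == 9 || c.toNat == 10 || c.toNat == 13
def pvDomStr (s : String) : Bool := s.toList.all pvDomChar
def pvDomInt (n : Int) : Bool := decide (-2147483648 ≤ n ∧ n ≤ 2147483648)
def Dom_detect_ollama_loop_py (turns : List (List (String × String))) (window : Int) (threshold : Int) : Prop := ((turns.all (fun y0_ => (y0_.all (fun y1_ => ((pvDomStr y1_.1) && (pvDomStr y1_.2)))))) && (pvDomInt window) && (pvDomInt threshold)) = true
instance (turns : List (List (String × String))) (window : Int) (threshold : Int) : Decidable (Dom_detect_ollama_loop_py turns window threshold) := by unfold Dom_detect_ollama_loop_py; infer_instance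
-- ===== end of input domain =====

-- B replaces A's repeated rescans with two frequency tables built in plain passes, then one any-over-values check (same cost class per message, no nested duplicate scan).

-- shared helpers: the dict lookup, the pattern tuple and the message comprehension, identical lines in both Pythons
def pvLookup (t : List (String × String)) (k : String) : Option String :=
  (t.find? (fun p => p.1 == k)).map Prod.snd

def pvPats : List String :=
  ["i'm just a program", "i don't have beliefs", "as a machine",
   "i can't change my position", "i don't have a mind", "i'm not conscious", "* silence"]

-- t["content"].strip().lower()[:80]; the .getD "" is only reached outside Pre_ (KeyError in Python)
def pvMsg (t : List (String × String)) : String :=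
  PySem.Str.slice (PySem.Str.lower (PySem.Str.strip ((pvLookup t "content").getD ""))) none (some 80)

def pvRecent (turns : List (List (String × String))) (window : Int) : List String :=
  (PySem.List.slice turns (some (-window)) none).filterMap
    (fun t => if pvLookup t "author" == some "Ollama" then some (pvMsg t) else none)

def pvPref (m : String) : String := PySem.Str.slice m none (some 60)

-- ===== PORT A =====
def detect_ollama_loop_py (turns : List (List (String × String))) (window : Int) (threshold : Int) : Bool :=
  let recent := pvRecent turns window
  if (recent.length : Int) < threshold then false
  else if pvPats.any (fun p => threshold ≤ ((recent.countP (fun m => PySem.Str.isIn p m) : Nat) : Int)) then true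
  else if threshold ≤ (recent.length : Int) then
    recent.any (fun m => threshold ≤ ((recent.countP (fun x => pvPref x == pvPref m) : Nat) : Int))
  else false

-- ===== PORT B =====
def detect_ollama_loop_py_alt (turns : List (List (String × String))) (window : Int) (threshold : Int) : Bool :=
  let recent := pvRecent turns window
  if (recent.length : Int) < threshold then false
  else
    let patCounts : PySem.Dict String Int :=
      recent.foldl
        (fun d m => pvPats.foldl (fun d p => if PySem.Str.isIn p m then d.modify p 0 (· + 1) else d) d)
        (pvPats.foldl (fun d p => d.insert p 0) PySem.Dict.empty)
    let prefCounts : PySem.Dict String Int :=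
      recent.foldl (fun d m => d.modify (pvPref m) 0 (· + 1)) PySem.Dict.empty
    patCounts.values.any (fun c => threshold ≤ c) || prefCounts.values.any (fun c => threshold ≤ c)

-- ===== PRECONDITION & SPEC =====
-- Pre_ excludes exactly the inputs where the comprehension raises KeyError in both Pythons:
-- a turn in the window whose author is "Ollama" but which has no "content" key.
def Pre_detect_ollama_loop_py (turns : List (List (String × String))) (window : Int) (threshold : Int) : Prop :=
  ∀ t ∈ PySem.List.slice turns (some (-window)) none,
    pvLookup t "author" = some "Ollama" → (pvLookup t "content").isSome
instance (turns : List (List (String × String))) (window : Int) (threshold : Int) : Decidable (Pre_detect_ollama_loop_py turns window threshold) := by unfold Pre_detect_ollama_loop_py; infer_instance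

def pvWitness_detect_ollama_loop_py : (List (List (String × String))) × Int × Int :=
  ([[("author", "Ollama"), ("content", "i'm not conscious")],
    [("author", "Ollama"), ("content", "i'm not conscious")]], 5, 2)

def Spec_detect_ollama_loop_py (turns : List (List (String × String))) (window : Int) (threshold : Int) (out : Bool) : Prop := out = detect_ollama_loop_py_alt turns window threshold
instance (turns : List (List (String × String))) (window : Int) (threshold : Int) (out : Bool) : Decidable (Spec_detect_ollama_loop_py turns window threshold out) := by unfold Spec_detect_ollama_loop_py; infer_instance

-- ===== CLAIM (what is proved, stated in full; the proofs are below) =====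
def Claim_equal_detect_ollama_loop_py : Prop := ∀ (turns : List (List (String × String))) (window : Int) (threshold : Int), Dom_detect_ollama_loop_py turns window threshold → Pre_detect_ollama_loop_py turns window threshold → Spec_detect_ollama_loop_py turns window threshold (detect_ollama_loop_py turns window threshold)

-- ===== LEMMAS AND PROOFS =====

-- countP with a forced equality: only q's occurrences can satisfy the test
theorem pv_countP_beq_and (ps : List String) (q : String) (f : String → Bool) :
    ps.countP (fun p => p == q && f p) = if f q then ps.count q else 0 := by
  induction ps with
  | nil => simp
  | cons a t ih =>
    by_cases ha : a = q
    · subst ha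
      by_cases hf : f a <;> simp [List.count_cons, ih, hf]
    · simp [List.count_cons, ih, ha]

-- the inner pattern loop of B adds, at key q, the number of patterns equal to q contained in m
theorem pv_inner_getD (ps : List String) (m : String) (d : PySem.Dict String Int) (q : String) :
    (ps.foldl (fun d p => if PySem.Str.isIn p m then d.modify p 0 (· + 1) else d) d).getD q 0
      = d.getD q 0 + (ps.countP (fun p => p == q && PySem.Str.isIn p m) : Int) := by
  induction ps generalizing d with
  | nil => simp
  | cons a t ih =>
    simp only [List.foldl_cons, ih, List.countP_cons]
    have hstep : (if PySem.Str.isIn a m then d.modify a 0 (· + 1) else d).getD q 0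
        = d.getD q 0 + (if (a == q && PySem.Str.isIn a m) then 1 else 0) := by
      by_cases hin : PySem.Str.isIn a m
      · rw [if_pos hin, PySem.Dict.getD_modify]
        by_cases ha : q = a
        · subst ha
          have : (q == q && PySem.Str.isIn q m) = true := by rw [hin]; simp
          rw [if_pos rfl, if_pos this]
        · have hne : (a == q && PySem.Str.isIn a m) = false := by
            have : (a == q) = false := beq_eq_false_iff_ne.mpr (fun h => ha h.symm)
            rw [this, Bool.false_and]
          rw [if_neg ha, hne]
          simp
      · have hin' : PySem.Str.isIn a m = false := Bool.eq_false_iff.mpr hin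
        have hne : (a == q && PySem.Str.isIn a m) = false := by
          rw [hin', Bool.and_false]
        rw [if_neg hin, hne]
        simp
    rw [hstep]
    push_cast
    ring

-- the inner pattern loop never changes the key list when every pattern is already a key
theorem pv_inner_keys (ps : List String) (m : String) (d : PySem.Dict String Int)
    (h : ∀ p ∈ ps, p ∈ d.keys) :
    (ps.foldl (fun d p => if PySem.Str.isIn p m then d.modify p 0 (· + 1) else d) d).keys = d.keys := by
  induction ps generalizing d with
  | nil => rfl
  | cons a t ih =>
    have ha : a ∈ d.keys := h a (by simp)
    have hk : (if PySem.Str.isIn a m then d.modify a 0 (· + 1) else d).keys = d.keys := by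
      split
      · rw [PySem.Dict.keys_modify,
            PySem.Dict.keys_insert_of_contains _ _ ((PySem.Dict.contains_iff_mem_keys _ _).mpr ha)]
      · rfl
    simp only [List.foldl_cons]
    rw [ih _ (fun p hp => by rw [hk]; exact h p (List.mem_cons_of_mem _ hp)), hk]

-- over the whole message list, key q (occurring once among the patterns) counts the messages containing q
theorem pv_outer_getD (R : List String) (d : PySem.Dict String Int) (q : String)
    (hq : pvPats.count q = 1) :
    (R.foldl (fun d m => pvPats.foldl (fun d p => if PySem.Str.isIn p m then d.modify p 0 (· + 1) else d) d) d).getD q 0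
      = d.getD q 0 + (R.countP (fun m => PySem.Str.isIn q m) : Int) := by
  induction R generalizing d with
  | nil => simp
  | cons m t ih =>
    simp only [List.foldl_cons, ih, pv_inner_getD, pv_countP_beq_and, hq, List.countP_cons]
    split_ifs <;> push_cast <;> ring

theorem pv_outer_keys (R : List String) (d : PySem.Dict String Int)
    (h : ∀ p ∈ pvPats, p ∈ d.keys) :
    (R.foldl (fun d m => pvPats.foldl (fun d p => if PySem.Str.isIn p m then d.modify p 0 (· + 1) else d) d) d).keys = d.keys := by
  induction R generalizing d with
  | nil => rfl
  | cons m t ih =>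
    simp only [List.foldl_cons]
    rw [ih _ (fun p hp => by rw [pv_inner_keys _ _ _ h]; exact h p hp), pv_inner_keys _ _ _ h]

def pvInit : PySem.Dict String Int := pvPats.foldl (fun d p => d.insert p 0) PySem.Dict.empty

theorem pv_init_keys : pvInit.keys = pvPats := by decide

theorem pv_init_facts : ∀ p ∈ pvPats, pvInit.getD p 0 = 0 ∧ pvPats.count p = 1 := by decide

theorem pv_pats_nodup : pvPats.Nodup := by decide

-- B's pattern table check equals A's pattern scan
theorem pv_pat_side (R : List String) (T : Int) :
    ((R.foldl (fun d m => pvPats.foldl (fun d p => if PySem.Str.isIn p m then d.modify p 0 (· + 1) else d) d) pvInit).values.any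
        (fun c => T ≤ c))
      = pvPats.any (fun p => T ≤ ((R.countP (fun m => PySem.Str.isIn p m) : Nat) : Int)) := by
  have hmem : ∀ p ∈ pvPats, p ∈ pvInit.keys := by rw [pv_init_keys]; exact fun p hp => hp
  have hkeys := pv_outer_keys R pvInit hmem
  rw [pv_init_keys] at hkeys
  have hval : ∀ p ∈ pvPats,
      (R.foldl (fun d m => pvPats.foldl (fun d p => if PySem.Str.isIn p m then d.modify p 0 (· + 1) else d) d) pvInit).getD p 0
        = ((R.countP (fun m => PySem.Str.isIn p m) : Nat) : Int) := by
    intro p hp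
    obtain ⟨h0, h1⟩ := pv_init_facts p hp
    rw [pv_outer_getD R pvInit p h1, h0, zero_add]
  have hnodup : (R.foldl (fun d m => pvPats.foldl (fun d p => if PySem.Str.isIn p m then d.modify p 0 (· + 1) else d) d) pvInit).keys.Nodup := by
    rw [hkeys]; exact pv_pats_nodup
  rw [PySem.Dict.values_eq_map_keys _ hnodup 0, hkeys, List.any_map, Bool.eq_iff_iff]
  simp only [List.any_eq_true, Function.comp]
  constructor
  · rintro ⟨p, hp, h⟩
    refine ⟨p, hp, ?_⟩
    simp only [hval p hp] at h
    exact h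
  · rintro ⟨p, hp, h⟩
    refine ⟨p, hp, ?_⟩
    simp only [hval p hp]
    exact h

-- B's prefix counter check equals A's duplicate-message scan
theorem pv_pref_side (R : List String) (T : Int) :
    ((R.foldl (fun d m => d.modify (pvPref m) 0 (· + 1)) PySem.Dict.empty).values.any (fun c => T ≤ c))
      = R.any (fun m => T ≤ ((R.countP (fun x => pvPref x == pvPref m) : Nat) : Int)) := by
  have hD : R.foldl (fun d m => d.modify (pvPref m) 0 (· + 1)) PySem.Dict.empty
      = PySem.Dict.counter (R.map pvPref) := by
    rw [PySem.Dict.counter_eq_foldl, List.foldl_map]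
  have hcnt : ∀ m : String, List.count (pvPref m) (R.map pvPref) = R.countP (fun x => pvPref x == pvPref m) := by
    intro m
    rw [List.count, List.countP_map]
    rfl
  rw [hD, PySem.Dict.values_eq_map_keys _ (PySem.Dict.nodup_keys_counter _) 0,
      PySem.Dict.keys_counter, List.any_map, Bool.eq_iff_iff]
  simp only [List.any_eq_true, Function.comp, PySem.Dict.getD_counter]
  constructor
  · rintro ⟨k, hk, hT⟩
    rw [PySem.Set.mem_ofList] at hk
    obtain ⟨m, hm, rfl⟩ := List.mem_map.mp hk
    refine ⟨m, hm, ?_⟩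
    simp only [hcnt m] at hT
    exact hT
  · rintro ⟨m, hm, hT⟩
    refine ⟨pvPref m, (PySem.Set.mem_ofList _ _).mpr (List.mem_map.mpr ⟨m, hm, rfl⟩), ?_⟩
    simp only [hcnt m]
    exact hT

-- ===== VERDICT (by name: the statement is the Claim_ definition above) =====
theorem detect_ollama_loop_py_spec : Claim_equal_detect_ollama_loop_py := by
  intro turns window threshold _ _
  unfold Spec_detect_ollama_loop_py detect_ollama_loop_py detect_ollama_loop_py_alt
  have hpat := pv_pat_side (pvRecent turns window) threshold
  have hpref := pv_pref_side (pvRecent turns window) threshold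
  rw [pvInit] at hpat
  by_cases hlen : ((pvRecent turns window).length : Int) < threshold
  · rw [if_pos hlen, if_pos hlen]
  · have hge : threshold ≤ ((pvRecent turns window).length : Int) := not_lt.mp hlen
    rw [if_neg hlen, if_neg hlen]
    simp only [hpat, hpref, if_pos hge]
    by_cases h1 : pvPats.any (fun p => threshold ≤ (((pvRecent turns window).countP (fun m => PySem.Str.isIn p m) : Nat) : Int)) = true
    · rw [if_pos h1, h1, Bool.true_or]
    · rw [if_neg h1, Bool.eq_false_iff.mpr h1, Bool.false_or]
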